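-- pv_equiv track=rewrite | github.com/Arnaud-TP/MyGit | MPSI - MP/Info Prépa/DM + TP Info/DM Exercice 4 DS Mars.py | postulant
-- ===== SOURCE A (Python) =====
-- def nbreA(a,sond):
--     n=0
--     for candidat in sond :
--         if candidat == a:
--             n+=1
--     return(n)
--
-- def postulant(sond): #len(sond) = N
--     max_n = 0 #Nombres de voix du postulant
--     Postulant = 0 #Postulant
--     max = 0 #Nombres de voix max du deuxième plus grand (pour déterminer le 'rang' du postulant)
--     candidat_deja_croise = []
--     for candidat in sond :
--         if candidat not in candidat_deja_croise :
--             candidat_deja_croise.append(candidat)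
--             p=nbreA(candidat,sond)
--             if p > max :
--                 if p > max_n:
--                     max = max_n
--                     max_n = p
--                     Postulant = candidat
--                 else :
--                     max = p
--     if max_n > len(sond) // 2:
--         return(Postulant,len(sond) - max)
--     return(-1,0)
-- ===== SOURCE B (Python) =====
-- def postulant(sond):
--     # Count every candidate once (O(N)), then replay the top-two selection
--     # over the distinct candidates in first-appearance order.
--     counts = {}
--     for c in sond:
--         counts[c] = counts.get(c, 0) + 1
--     max_n = 0   # highest vote count
--     best = 0    # its (first) holder
--     second = 0  # second-highest vote count
--     for cand, p in counts.items():
--         if p > max_n: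
--             second, max_n, best = max_n, p, cand
--         elif p > second:
--             second = p
--     if max_n > len(sond) // 2:
--         return (best, len(sond) - second)
--     return (-1, 0)
-- ===== Notes on version B (the rewrite author's own statement) =====
-- stated objective: faster
-- what changed: B counts all candidates in one dict pass and replays the top-two selection over the distinct items, removing A's per-candidate membership scan and full recount (nbreA).
import Mathlib
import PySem

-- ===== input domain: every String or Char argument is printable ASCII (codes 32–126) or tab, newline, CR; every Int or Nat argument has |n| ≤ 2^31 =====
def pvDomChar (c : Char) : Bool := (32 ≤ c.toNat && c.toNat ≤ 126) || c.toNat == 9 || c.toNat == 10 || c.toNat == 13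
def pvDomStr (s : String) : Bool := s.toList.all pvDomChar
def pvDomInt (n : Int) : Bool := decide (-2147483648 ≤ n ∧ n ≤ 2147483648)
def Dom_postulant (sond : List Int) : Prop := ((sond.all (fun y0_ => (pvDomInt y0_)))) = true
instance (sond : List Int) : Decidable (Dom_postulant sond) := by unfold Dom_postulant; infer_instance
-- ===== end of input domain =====

-- B replaces A's quadratic rescans with one counting pass + a replay over the distinct items (objective: faster, asymptotic).

-- ===== PORT A =====
def nbreA (a : Int) (sond : List Int) : Int :=
  sond.foldl (fun n candidat => if candidat == a then n + 1 else n) 0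

-- the body of A's for-loop, state ((max_n, Postulant, max), candidat_deja_croise)
def stepA (sond : List Int) (st : (Int × Int × Int) × List Int) (candidat : Int) :
    (Int × Int × Int) × List Int :=
  if !(st.2.contains candidat) then
    let seen := st.2 ++ [candidat]
    let p := nbreA candidat sond
    if p > st.1.2.2 then
      if p > st.1.1 then ((p, candidat, st.1.1), seen)
      else ((st.1.1, st.1.2.1, p), seen)
    else (st.1, seen)
  else st

def postulant (sond : List Int) : Int × Int :=
  let r := sond.foldl (stepA sond) ((0, 0, 0), [])
  if r.1.1 > PySem.Int.floordiv (sond.length : Int) 2 then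
    (r.1.2.1, (sond.length : Int) - r.1.2.2)
  else (-1, 0)

-- ===== PORT B =====
-- the body of B's for-loop, state (max_n, best, second), pr = (cand, p)
def stepB (s : Int × Int × Int) (pr : Int × Int) : Int × Int × Int :=
  if pr.2 > s.1 then (pr.2, pr.1, s.1)
  else if pr.2 > s.2.2 then (s.1, s.2.1, pr.2)
  else s

def postulant_alt (sond : List Int) : Int × Int :=
  let counts := sond.foldl (fun (d : PySem.Dict Int Int) c => d.insert c (d.getD c 0 + 1))
    PySem.Dict.empty
  let s := counts.items.foldl stepB (0, 0, 0)
  if s.1 > PySem.Int.floordiv (sond.length : Int) 2 then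
    (s.2.1, (sond.length : Int) - s.2.2)
  else (-1, 0)

-- ===== PRECONDITION & SPEC =====
def Spec_postulant (sond : List Int) (out : Int × Int) : Prop := out = postulant_alt sond
instance (sond : List Int) (out : Int × Int) : Decidable (Spec_postulant sond out) := by unfold Spec_postulant; infer_instance

-- ===== CLAIM (what is proved, stated in full; the proofs are below) =====
def Claim_equal_postulant : Prop := ∀ (sond : List Int), Dom_postulant sond → Spec_postulant sond (postulant sond)

-- ===== LEMMAS AND PROOFS =====

-- the elements of l not yet in seen, first occurrences, in order
def fresh (seen : List Int) : List Int → List Int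
  | [] => []
  | c :: t => if seen.contains c then fresh seen t else c :: fresh (seen ++ [c]) t

theorem append_fresh (l seen : List Int) :
    seen ++ fresh seen l = PySem.Set.update seen l := by
  induction l generalizing seen with
  | nil => simp [fresh, PySem.Set.update]
  | cons c t ih =>
    rw [show PySem.Set.update seen (c :: t) = PySem.Set.update (PySem.Set.add seen c) t from rfl]
    by_cases h : seen.contains c
    · have hadd : PySem.Set.add seen c = seen := by
        rw [show PySem.Set.add seen c = if seen.contains c then seen else seen ++ [c] from rfl, h]
        rfl
      rw [fresh, if_pos h, hadd]
      exact ih seen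
    · have hb : seen.contains c = false := by simpa using h
      have hadd : PySem.Set.add seen c = seen ++ [c] := by
        rw [show PySem.Set.add seen c = if seen.contains c then seen else seen ++ [c] from rfl, hb]
        rfl
      rw [fresh, if_neg h, hadd, ← ih (seen ++ [c])]
      simp

theorem nbreA_eq_count (a : Int) (sond : List Int) :
    nbreA a sond = (sond.count a : Int) := by
  unfold nbreA
  simpa using PySem.List.foldl_beq_add_one (l := sond) (v := a) (a := 0)

theorem stepB_inv (s : Int × Int × Int) (pr : Int × Int) (h : s.2.2 ≤ s.1) :
    (stepB s pr).2.2 ≤ (stepB s pr).1 := by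
  obtain ⟨m, b, sec⟩ := s
  obtain ⟨c, p⟩ := pr
  dsimp only at h
  unfold stepB; split_ifs <;> dsimp only <;> omega

theorem loopA_eq (sond : List Int) :
    ∀ (l seen : List Int) (s : Int × Int × Int), s.2.2 ≤ s.1 →
    l.foldl (stepA sond) (s, seen) =
      (((fresh seen l).map (fun k => (k, nbreA k sond))).foldl stepB s,
        seen ++ fresh seen l) := by
  intro l
  induction l with
  | nil => intro seen s _; simp [fresh]
  | cons c t ih =>
    intro seen s hs
    by_cases h : seen.contains c
    · have hc : c ∈ seen := by simpa using h
      have hA : stepA sond (s, seen) c = (s, seen) := by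
        simp [stepA, hc]
      rw [List.foldl_cons, hA, fresh, if_pos h]
      exact ih seen s hs
    · have hb : seen.contains c = false := by simpa using h
      obtain ⟨m, b, sec⟩ := s
      have hA : stepA sond ((m, b, sec), seen) c
          = (stepB (m, b, sec) (c, nbreA c sond), seen ++ [c]) := by
        dsimp only at hs
        simp only [stepA, stepB, hb, Bool.not_false, if_true]
        split_ifs <;> first | rfl | (exfalso; omega)
      have hinv : (stepB (m, b, sec) (c, nbreA c sond)).2.2
          ≤ (stepB (m, b, sec) (c, nbreA c sond)).1 := stepB_inv _ _ hs
      rw [List.foldl_cons, hA, ih (seen ++ [c]) _ hinv, fresh, if_neg h]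
      simp

theorem counts_items (sond : List Int) :
    (sond.foldl (fun (d : PySem.Dict Int Int) c => d.insert c (d.getD c 0 + 1))
      PySem.Dict.empty).items
      = (PySem.Set.ofList sond).map (fun k => (k, (sond.count k : Int))) := by
  rw [PySem.Dict.foldl_insert_getD_add_one_eq_counter, PySem.Dict.items_counter]

theorem fresh_nil (sond : List Int) : fresh [] sond = PySem.Set.ofList sond := by
  have h := append_fresh sond []
  simpa [show PySem.Set.ofList sond = PySem.Set.update [] sond from rfl] using h

-- ===== VERDICT (by name: the statement is the Claim_ definition above) =====
theorem postulant_spec : Claim_equal_postulant := by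
  intro sond _
  show postulant sond = postulant_alt sond
  simp only [postulant, postulant_alt]
  rw [loopA_eq sond sond [] (0, 0, 0) (by norm_num), counts_items, fresh_nil]
  have hmap : (fun k : Int => (k, nbreA k sond))
      = (fun k : Int => (k, (sond.count k : Int))) := by
    funext k; rw [nbreA_eq_count]
  rw [hmap]
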